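-- pv_equiv track=rewrite | github.com/Kinrokin/KT | KT_PROD_CLEANROOM/tools/operator/cohort0_successor_third_surface_breadth_witness_wave_tranche.py | _require_same_subject_head
-- ===== SOURCE A (Python) =====
-- from typing import Any, Dict, Optional, Sequence
--
-- def _require_same_subject_head(packets: Sequence[Dict[str, Any]]) -> str:
--     heads = {
--         str(packet.get("subject_head", "")).strip()
--         for packet in packets
--         if isinstance(packet, dict) and str(packet.get("subject_head", "")).strip()
--     }
--     if len(heads) != 1:
--         raise RuntimeError("FAIL_CLOSED: third-surface breadth wave requires one same-head authority line")
--     return next(iter(heads))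
-- ===== SOURCE B (Python) =====
-- from typing import Any, Dict, Sequence
--
-- def _require_same_subject_head(packets: Sequence[Dict[str, Any]]) -> str:
--     found = None
--     for packet in packets:
--         if not isinstance(packet, dict):
--             continue
--         head = str(packet.get("subject_head", "")).strip()
--         if not head:
--             continue
--         if found is None:
--             found = head
--         elif head != found:
--             raise RuntimeError("FAIL_CLOSED: third-surface breadth wave requires one same-head authority line")
--     if found is None:
--         raise RuntimeError("FAIL_CLOSED: third-surface breadth wave requires one same-head authority line")
--     return found
-- ===== Notes on version B (the rewrite author's own statement) =====
-- stated objective: simpler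
-- what changed: Replaces the set comprehension plus cardinality check with a single pass tracking one scalar 'found' head, raising immediately on the first conflicting head and keeping no collection.
import Mathlib
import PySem

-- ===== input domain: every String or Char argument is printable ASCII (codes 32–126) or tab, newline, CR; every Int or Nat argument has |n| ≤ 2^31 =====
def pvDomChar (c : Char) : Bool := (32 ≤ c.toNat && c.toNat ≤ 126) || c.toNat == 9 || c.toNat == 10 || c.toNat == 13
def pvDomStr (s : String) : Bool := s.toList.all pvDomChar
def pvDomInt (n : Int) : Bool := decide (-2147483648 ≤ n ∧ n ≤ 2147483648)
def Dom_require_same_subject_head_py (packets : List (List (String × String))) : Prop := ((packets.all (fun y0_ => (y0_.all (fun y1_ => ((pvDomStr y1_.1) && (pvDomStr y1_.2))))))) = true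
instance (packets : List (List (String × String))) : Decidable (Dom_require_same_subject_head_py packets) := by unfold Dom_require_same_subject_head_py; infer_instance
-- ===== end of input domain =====

-- B replaces A's set comprehension + cardinality check with a single pass tracking one
-- scalar 'found' head (objective: simpler). Both raise RuntimeError outside Pre_.

-- str(packet.get("subject_head", "")).strip() — shared by both ports and Pre_
def pvHead (p : List (String × String)) : String :=
  PySem.Str.strip ((p.lookup "subject_head").getD "")  -- assoc-list dict: first match

-- the qualifying (non-empty, stripped) heads, in packet order
def pvHeads (packets : List (List (String × String))) : List String :=
  packets.filterMap (fun p => let h := pvHead p; if h = "" then none else some h)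

-- ===== PORT A =====
def require_same_subject_head_py (packets : List (List (String × String))) : String :=
  let heads : PySem.Set String := PySem.Set.ofList (pvHeads packets)
  match heads with
  | [h] => h
  | _ => ""   -- len(heads) != 1: RuntimeError (outside Pre_)

-- ===== PORT B =====
def pvAltGo (found : Option String) : List (List (String × String)) → String
  | [] => match found with
          | some h => h
          | none => ""          -- RuntimeError (outside Pre_)
  | p :: rest =>
    let h := pvHead p
    if h = "" then pvAltGo found rest
    else match found with
         | none => pvAltGo (some h) rest
         | some g => if h = g then pvAltGo (some g) rest
                     else ""    -- RuntimeError (outside Pre_)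

def require_same_subject_head_py_alt (packets : List (List (String × String))) : String :=
  pvAltGo none packets

-- ===== PRECONDITION & SPEC =====
-- Pre_ excludes exactly the inputs on which A raises RuntimeError: no qualifying head,
-- or two distinct qualifying heads.
def Pre_require_same_subject_head_py (packets : List (List (String × String))) : Prop :=
  pvHeads packets ≠ [] ∧ ∀ x ∈ pvHeads packets, x = (pvHeads packets).headD ""
instance (packets : List (List (String × String))) : Decidable (Pre_require_same_subject_head_py packets) := by unfold Pre_require_same_subject_head_py; infer_instance

def pvWitness_require_same_subject_head_py : (List (List (String × String))) :=
  [[("subject_head", "alpha")], [("subject_head", " alpha ")], []]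

def Spec_require_same_subject_head_py (packets : List (List (String × String))) (out : String) : Prop := out = require_same_subject_head_py_alt packets
instance (packets : List (List (String × String))) (out : String) : Decidable (Spec_require_same_subject_head_py packets out) := by unfold Spec_require_same_subject_head_py; infer_instance

-- ===== CLAIM (what is proved, stated in full; the proofs are below) =====
def Claim_equal_require_same_subject_head_py : Prop := ∀ (packets : List (List (String × String))), Dom_require_same_subject_head_py packets → Pre_require_same_subject_head_py packets → Spec_require_same_subject_head_py packets (require_same_subject_head_py packets)

-- ===== LEMMAS AND PROOFS =====

theorem pv_ofList_const {h : String} {t : List String} (hall : ∀ x ∈ t, x = h) :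
    PySem.Set.ofList (h :: t) = [h] := by
  have base : PySem.Set.ofList (h :: t) = t.foldl PySem.Set.add [h] := by
    simp [PySem.Set.ofList_eq_foldl, List.foldl_cons, PySem.Set.add, PySem.Set.contains]
  rw [base]
  clear base
  induction t with
  | nil => rfl
  | cons x xs ih =>
    have hx : x = h := hall x (by simp)
    have : PySem.Set.add [h] x = [h] := by
      simp [PySem.Set.add, PySem.Set.contains, hx]
    simp only [List.foldl_cons, this]
    exact ih (fun y hy => hall y (by simp [hy]))

theorem pv_heads_cons (p : List (String × String)) (rest : List (List (String × String))) :
    pvHeads (p :: rest) =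
      (if pvHead p = "" then pvHeads rest else pvHead p :: pvHeads rest) := by
  by_cases h : pvHead p = "" <;> simp [pvHeads, h]

theorem pv_altGo_some (packets : List (List (String × String))) (h : String)
    (hall : ∀ x ∈ pvHeads packets, x = h) : pvAltGo (some h) packets = h := by
  induction packets with
  | nil => rfl
  | cons p rest ih =>
    rw [pv_heads_cons] at hall
    by_cases hp : pvHead p = ""
    · simp only [pvAltGo, hp, if_true]
      exact ih (by simpa [hp] using hall)
    · have hph : pvHead p = h := hall (pvHead p) (by simp [hp])
      simp only [pvAltGo]
      rw [if_neg hp, if_pos hph]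
      exact ih (fun x hx => hall x (by simp [hp, hx]))

theorem pv_altGo_none (packets : List (List (String × String))) (h : String) (t : List String)
    (heq : pvHeads packets = h :: t) (hall : ∀ x ∈ t, x = h) :
    pvAltGo none packets = h := by
  induction packets with
  | nil => simp [pvHeads] at heq
  | cons p rest ih =>
    rw [pv_heads_cons] at heq
    by_cases hp : pvHead p = ""
    · simp only [pvAltGo, hp, if_true]
      exact ih (by simpa [hp] using heq)
    · rw [if_neg hp] at heq
      have hph : pvHead p = h := (List.cons.injEq _ _ _ _ ▸ heq).1
      have ht : pvHeads rest = t := (List.cons.injEq _ _ _ _ ▸ heq).2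
      simp only [pvAltGo]
      rw [if_neg hp, hph]
      exact pv_altGo_some rest h (fun x hx => hall x (ht ▸ hx))

-- ===== VERDICT (by name: the statement is the Claim_ definition above) =====
theorem require_same_subject_head_py_spec : Claim_equal_require_same_subject_head_py := by
  intro packets _ hpre
  obtain ⟨hne, hall⟩ := hpre
  unfold Spec_require_same_subject_head_py
  obtain ⟨h, t, heq⟩ : ∃ h t, pvHeads packets = h :: t := by
    cases hh : pvHeads packets with
    | nil => exact absurd hh hne
    | cons a b => exact ⟨a, b, rfl⟩
  rw [heq] at hall
  simp only [List.headD_cons] at hall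
  have hallt : ∀ x ∈ t, x = h := fun x hx => hall x (by simp [hx])
  have hA : require_same_subject_head_py packets = h := by
    unfold require_same_subject_head_py
    rw [heq, pv_ofList_const hallt]
  have hB : require_same_subject_head_py_alt packets = h := by
    unfold require_same_subject_head_py_alt
    exact pv_altGo_none packets h t heq hallt
  rw [hA, hB]
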